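-- pv_equiv track=rewrite | github.com/smalec/ner-for-asr | lattice_to_graphs.py | get_outgoing_edges
-- ===== SOURCE A (Python) =====
-- def get_outgoing_edges(graph):
--     outgoing_edges = {}
--     for edge in graph['edges']:
--         from_id = edge['from']
--         if from_id not in outgoing_edges:
--             outgoing_edges[from_id] = []
--         outgoing_edges[from_id].append(edge)
--     return outgoing_edges
-- ===== SOURCE B (Python) =====
-- def get_outgoing_edges(graph):
--     edges = graph['edges']
--     order = dict.fromkeys(e['from'] for e in edges)
--     return {k: [e for e in edges if e['from'] == k] for k in order}
-- ===== Notes on version B (the rewrite author's own statement) =====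
-- stated objective: alternative
-- what changed: A accumulates groups in one pass with a per-edge membership-check-and-append into a dict; B instead computes the distinct source ids once (dict.fromkeys) and then builds each group by a separate filter comprehension over the edge list, a keys-then-filter decomposition with no incremental dict mutation.
import Mathlib
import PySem

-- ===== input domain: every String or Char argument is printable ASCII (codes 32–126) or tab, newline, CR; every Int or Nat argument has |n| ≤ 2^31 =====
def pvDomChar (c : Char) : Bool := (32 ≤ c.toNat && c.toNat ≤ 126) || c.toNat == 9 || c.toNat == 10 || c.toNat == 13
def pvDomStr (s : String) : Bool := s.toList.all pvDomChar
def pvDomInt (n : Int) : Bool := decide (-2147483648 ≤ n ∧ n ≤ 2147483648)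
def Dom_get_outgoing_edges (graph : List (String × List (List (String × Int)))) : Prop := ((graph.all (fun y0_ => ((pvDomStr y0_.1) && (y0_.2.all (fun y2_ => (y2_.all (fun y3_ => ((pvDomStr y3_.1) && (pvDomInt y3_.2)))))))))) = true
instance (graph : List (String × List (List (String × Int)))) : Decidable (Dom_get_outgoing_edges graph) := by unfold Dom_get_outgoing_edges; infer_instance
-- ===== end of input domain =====

-- B groups edges by a keys-then-filter decomposition (distinct ids first, then one filter per id)
-- instead of A's per-edge membership-check-and-append dict accumulation; same return value, no speed claim.

-- ===== PORT A =====
-- graph['edges'] / edge['from'] are dict lookups (first match); under Pre_ both are present,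
-- so the .getD defaults are never the result (a missing key is a KeyError, excluded by Pre_).
def get_outgoing_edges (graph : List (String × List (List (String × Int)))) : List (Int × List (List (String × Int))) :=
  let edges := ((PySem.Dict.mk graph).get? "edges").getD []
  (edges.foldl (fun d edge =>
      let from_id : Int := ((PySem.Dict.mk edge).get? "from").getD 0
      let d' := if d.contains from_id then d else d.insert from_id []
      d'.modify from_id [] (fun l => l ++ [edge]))
    PySem.Dict.empty).items

-- ===== PORT B =====
def get_outgoing_edges_alt (graph : List (String × List (List (String × Int)))) : List (Int × List (List (String × Int))) :=
  let edges := ((PySem.Dict.mk graph).get? "edges").getD []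
  -- order = dict.fromkeys(e['from'] for e in edges)  (value None ↦ Option Int none; only the keys are used)
  let order := (edges.foldl (fun d e => d.insert (((PySem.Dict.mk e).get? "from").getD 0) (none : Option Int)) PySem.Dict.empty).keys
  -- {k: [e for e in edges if e['from'] == k] for k in order}
  (order.foldl (fun d k => d.insert k (edges.filter (fun e => ((PySem.Dict.mk e).get? "from").getD 0 == k))) PySem.Dict.empty).items

-- ===== PRECONDITION & SPEC =====
-- Pre_ excludes exactly the inputs on which A raises KeyError: a graph without an 'edges' key,
-- or an edge without a 'from' key.
def Pre_get_outgoing_edges (graph : List (String × List (List (String × Int)))) : Prop :=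
  ((PySem.Dict.mk graph).get? "edges").isSome = true ∧
  ∀ e ∈ ((PySem.Dict.mk graph).get? "edges").getD [], ((PySem.Dict.mk e).get? "from").isSome = true
instance (graph : List (String × List (List (String × Int)))) : Decidable (Pre_get_outgoing_edges graph) := by unfold Pre_get_outgoing_edges; infer_instance

def pvWitness_get_outgoing_edges : (List (String × List (List (String × Int)))) :=
  [("edges", [[("from", 0), ("to", 1)], [("from", 2), ("to", 1)], [("from", 0), ("to", 2)]])]

def Spec_get_outgoing_edges (graph : List (String × List (List (String × Int)))) (out : List (Int × List (List (String × Int)))) : Prop := out = get_outgoing_edges_alt graph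
instance (graph : List (String × List (List (String × Int)))) (out : List (Int × List (List (String × Int)))) : Decidable (Spec_get_outgoing_edges graph out) := by unfold Spec_get_outgoing_edges; infer_instance

-- ===== CLAIM (what is proved, stated in full; the proofs are below) =====
def Claim_equal_get_outgoing_edges : Prop := ∀ (graph : List (String × List (List (String × Int)))), Dom_get_outgoing_edges graph → Pre_get_outgoing_edges graph → Spec_get_outgoing_edges graph (get_outgoing_edges graph)

-- ===== LEMMAS AND PROOFS =====

-- the source id of an edge, as both ports compute it
def pvFid (e : List (String × Int)) : Int := ((PySem.Dict.mk e).get? "from").getD 0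

-- A's "ensure key then append" step is exactly Dict.modify with default []
theorem pv_stepA_eq {κ : Type} [BEq κ] [LawfulBEq κ] (d : PySem.Dict κ (List (List (String × Int))))
    (k : κ) (e : List (String × Int)) :
    (if d.contains k then d else d.insert k []).modify k [] (fun l => l ++ [e])
      = d.modify k [] (fun l => l ++ [e]) := by
  by_cases h : d.contains k
  · simp [h]
  · have h0 : d.getD k [] = [] := PySem.Dict.getD_of_not_contains d [] (by simpa using h)
    simp [h, PySem.Dict.modify, PySem.Dict.getD_insert_self, PySem.Dict.insert_insert_self, h0]

-- both ports, over any edge list, produce the same items list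
theorem pv_grouped_eq (edges : List (List (String × Int))) :
    (edges.foldl (fun d edge =>
        let from_id : Int := ((PySem.Dict.mk edge).get? "from").getD 0
        let d' := if d.contains from_id then d else d.insert from_id []
        d'.modify from_id [] (fun l => l ++ [edge]))
      PySem.Dict.empty).items
    = (((edges.foldl (fun d e => d.insert (((PySem.Dict.mk e).get? "from").getD 0) (none : Option Int)) PySem.Dict.empty).keys).foldl
        (fun d k => d.insert k (edges.filter (fun e => ((PySem.Dict.mk e).get? "from").getD 0 == k))) PySem.Dict.empty).items := by
  -- rewrite A's step via pv_stepA_eq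
  have hA : (edges.foldl (fun d edge =>
        let from_id : Int := ((PySem.Dict.mk edge).get? "from").getD 0
        let d' := if d.contains from_id then d else d.insert from_id []
        d'.modify from_id [] (fun l => l ++ [edge]))
      PySem.Dict.empty)
      = edges.foldl (fun d edge => d.modify (pvFid edge) [] (fun l => l ++ [edge])) PySem.Dict.empty := by
    have hf : (fun (d : PySem.Dict Int (List (List (String × Int)))) edge =>
        let from_id : Int := ((PySem.Dict.mk edge).get? "from").getD 0
        let d' := if d.contains from_id then d else d.insert from_id []
        d'.modify from_id [] (fun l => l ++ [edge]))
        = (fun d edge => d.modify (pvFid edge) [] (fun l => l ++ [edge])) := by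
      funext d edge
      simpa [pvFid] using pv_stepA_eq d (pvFid edge) edge
    rw [hf]
  rw [hA]
  set D := edges.foldl (fun d edge => d.modify (pvFid edge) [] (fun l => l ++ [edge])) PySem.Dict.empty with hD
  -- keys of both intermediate dicts are the distinct source ids, in first-occurrence order
  have hkeysA : D.keys = PySem.Set.update [] (edges.map pvFid) := by
    rw [hD]
    exact PySem.Dict.keys_foldl_modify_key edges pvFid [] (fun _ edge l => l ++ [edge]) PySem.Dict.empty
  have hkeysB : (edges.foldl (fun d e => d.insert (((PySem.Dict.mk e).get? "from").getD 0) (none : Option Int)) PySem.Dict.empty).keys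
      = PySem.Set.update [] (edges.map pvFid) := by
    exact PySem.Dict.keys_foldl_insert_key edges pvFid (fun _ _ => (none : Option Int)) PySem.Dict.empty
  have hnodup : D.keys.Nodup := by
    rw [hD]
    exact PySem.Dict.nodup_keys_foldl_modify_key edges pvFid [] (fun _ edge l => l ++ [edge]) PySem.Dict.empty (by simp)
  -- A's group for any id c is the filter
  have hgetD : ∀ c : Int, D.getD c [] = edges.filter (fun e => pvFid e == c) := by
    intro c
    have := PySem.Dict.getD_foldl_modify_append (edges.map (fun e => (pvFid e, e))) PySem.Dict.empty c
    rw [List.foldl_map] at this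
    simpa [hD, List.filter_map, Function.comp_def] using this
  -- B's comprehension over distinct fresh keys appends its pairs in order
  have hB : (((edges.foldl (fun d e => d.insert (((PySem.Dict.mk e).get? "from").getD 0) (none : Option Int)) PySem.Dict.empty).keys).foldl
        (fun d k => d.insert k (edges.filter (fun e => ((PySem.Dict.mk e).get? "from").getD 0 == k))) PySem.Dict.empty).items
      = (PySem.Set.update [] (edges.map pvFid)).map (fun k => (k, edges.filter (fun e => pvFid e == k))) := by
    rw [hkeysB]
    have := PySem.Dict.items_foldl_insert_fresh (PySem.Set.update [] (edges.map pvFid))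
      (fun k => k) (fun k => edges.filter (fun e => pvFid e == k)) PySem.Dict.empty
      (by intro a _; simp) (by simpa using hkeysA ▸ hnodup)
    simpa [pvFid] using this
  rw [hB, PySem.Dict.items_eq_map_keys D hnodup [], hkeysA]
  exact List.map_congr_left (fun k _ => by rw [hgetD k])

-- ===== VERDICT (by name: the statement is the Claim_ definition above) =====
theorem get_outgoing_edges_spec : Claim_equal_get_outgoing_edges := by
  intro graph _ _
  unfold Spec_get_outgoing_edges get_outgoing_edges get_outgoing_edges_alt
  exact pv_grouped_eq _
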